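-- pv_equiv track=rewrite | github.com/manman4/study_OEIS | staircase_polyomino/335547/335547_01.py | f
-- ===== SOURCE A (Python) =====
-- def f(n):
--     coords = {(x, y) for x in range(n) for y in range(n) if x <= y}
--     pieces = []
--     for size in range(1, n+1):
--         b0 = {(x, y) for x in range(size) for y in range(size) if x <= y}
--         pieces += [{(x+ox, y+oy) for x, y in b0} for ox in range(n) for oy in range(n)]
--     pieces = [p for p in pieces if p <= coords]
--     pieces.sort(key=min)
--
--     def recurse(grid, candidates, depth=1):
--         if not grid: return 1
--         if not candidates: return 0
--         hd, tl = candidates[0], candidates[1:]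
--         if min(grid) != min(hd): return 0
--         if hd <= grid: return recurse(grid - hd, [t for t in tl if not (hd & t)], depth+1) + recurse(grid, tl, depth+1)
--         return recurse(grid, tl, depth+1)
--     return recurse(coords, pieces)
-- ===== SOURCE B (Python) =====
-- def f(n):
--     coords = {(x, y) for x in range(n) for y in range(n) if x <= y}
--     pieces = []
--     for size in range(1, n+1):
--         b0 = {(x, y) for x in range(size) for y in range(size) if x <= y}
--         pieces += [{(x+ox, y+oy) for x, y in b0} for ox in range(n) for oy in range(n)]
--     pieces = [p for p in pieces if p <= coords]
--
--     def count(grid):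
--         if not grid:
--             return 1
--         c = min(grid)
--         return sum(count(grid - p) for p in pieces if c in p and p <= grid)
--     return count(coords)
-- ===== Notes on version B (the rewrite author's own statement) =====
-- stated objective: simpler
-- what changed: The use/skip recursion over a sorted, overlap-filtered candidate list is replaced by the classic forced-cell exact-cover count: count(grid) sums count(grid - p) over all pieces that contain the lexicographically smallest uncovered cell and fit in the grid, with an empty grid as the base case, so the sort, the candidate-list threading, the tail slicing and the binary use/skip branching all disappear.
import Mathlib
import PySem

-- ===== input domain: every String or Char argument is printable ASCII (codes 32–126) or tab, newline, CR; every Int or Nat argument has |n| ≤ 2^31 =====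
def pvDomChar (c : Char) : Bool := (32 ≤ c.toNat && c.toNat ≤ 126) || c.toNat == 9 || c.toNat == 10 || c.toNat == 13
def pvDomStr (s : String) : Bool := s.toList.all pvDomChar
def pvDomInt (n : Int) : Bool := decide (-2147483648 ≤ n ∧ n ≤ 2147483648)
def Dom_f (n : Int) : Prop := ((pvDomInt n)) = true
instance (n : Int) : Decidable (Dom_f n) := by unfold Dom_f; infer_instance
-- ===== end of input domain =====

-- B replaces A's sorted-candidate use/skip recursion by the forced-cell exact-cover sum
-- (no sort, no candidate-list threading); objective: simpler, same region and piece list.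

-- ===== PORT A =====

-- min(s) on a nonempty set of int pairs (Python tuple order = lexicographic);
-- total form via getD, every call site below passes a nonempty list.
def pyMinPair (s : List (Int × Int)) : Int × Int :=
  (PySem.List.min2? s Prod.fst Prod.snd).getD (0, 0)

-- {(x, y) for x in range(a) for y in range(a) if x <= y}
def triRegion (a : Int) : List (Int × Int) :=
  PySem.Set.ofList ((PySem.List.pyRange 0 a 1).flatMap (fun x =>
    (PySem.List.pyRange 0 a 1).filterMap (fun y => if x ≤ y then some (x, y) else none)))

-- {(x+ox, y+oy) for x, y in b0}
def shift (p : List (Int × Int)) (ox oy : Int) : List (Int × Int) :=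
  PySem.Set.ofList (p.map (fun q => (q.1 + ox, q.2 + oy)))

-- pieces = []; for size in range(1, n+1): pieces += [...]
def rawPieces (n : Int) : List (List (Int × Int)) :=
  (PySem.List.pyRange 1 (n + 1) 1).foldl (fun acc size =>
    acc ++ ((PySem.List.pyRange 0 n 1).flatMap (fun ox =>
      (PySem.List.pyRange 0 n 1).map (fun oy => shift (triRegion size) ox oy)))) []

-- pieces = [p for p in pieces if p <= coords]
def fitPieces (n : Int) : List (List (Int × Int)) :=
  (rawPieces n).filter (fun p => PySem.Set.issubset p (triRegion n))

-- A's recurse(grid, candidates, depth); 'not (hd & t)' is Set.isdisjoint hd t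
def recurseA (grid : List (Int × Int)) (cands : List (List (Int × Int))) (depth : Int) : Int :=
  if grid = [] then 1
  else
    match cands with
    | [] => 0
    | hd :: tl =>
      if pyMinPair grid ≠ pyMinPair hd then 0
      else if PySem.Set.issubset hd grid then
        recurseA (PySem.Set.diff grid hd) (tl.filter (fun t => PySem.Set.isdisjoint hd t)) (depth + 1)
          + recurseA grid tl (depth + 1)
      else recurseA grid tl (depth + 1)
termination_by cands.length
decreasing_by
  · simp only [List.length_cons, List.length_unattach]
    exact Nat.lt_succ_of_le (le_trans (List.length_filter_le _ _) (le_of_eq List.length_attach))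
  · simp only [List.length_cons]; omega
  · simp only [List.length_cons]; omega

-- pieces.sort(key=min) then recurse(coords, pieces)
def f (n : Int) : Int :=
  recurseA (triRegion n)
    (PySem.List.sorted2 (fitPieces n) (fun p => (pyMinPair p).1) (fun p => (pyMinPair p).2)) 1

-- ===== PORT B =====

-- B's count(grid); the Nat fuel only makes the recursion total (each call strictly
-- shrinks the grid, and the top call passes grid.length + 1 fuel, so it never runs out)
def countB (pieces : List (List (Int × Int))) : Nat → List (Int × Int) → Int
  | 0, _ => 0
  | fuel + 1, grid =>
    if grid = [] then 1
    else
      ((pieces.filter (fun p =>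
          PySem.Set.contains p (pyMinPair grid) && PySem.Set.issubset p grid)).map
        (fun p => countB pieces fuel (PySem.Set.diff grid p))).sum

def f_alt (n : Int) : Int :=
  countB (fitPieces n) ((triRegion n).length + 1) (triRegion n)

-- ===== PRECONDITION & SPEC =====
def Spec_f (n : Int) (out : Int) : Prop := out = f_alt n
instance (n : Int) (out : Int) : Decidable (Spec_f n out) := by unfold Spec_f; infer_instance

-- ===== CLAIM (what is proved, stated in full; the proofs are below) =====
def Claim_equal_f : Prop := ∀ (n : Int), Dom_f n → Spec_f n (f n)

-- ===== LEMMAS AND PROOFS =====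

-- lexicographic (Python tuple) strict order on int pairs
def pltp (a b : Int × Int) : Prop := a.1 < b.1 ∨ (a.1 = b.1 ∧ a.2 < b.2)

lemma pltp_trans {a b c : Int × Int} (h1 : pltp a b) (h2 : pltp b c) : pltp a c := by
  unfold pltp at *; omega
lemma pltp_total {a b : Int × Int} (h1 : ¬ pltp a b) (h2 : ¬ pltp b a) : a = b := by
  unfold pltp at *
  have : a.1 = b.1 ∧ a.2 = b.2 := by omega
  exact Prod.ext this.1 this.2
lemma pltp_irrefl (a : Int × Int) : ¬ pltp a a := by unfold pltp; omega

def pltb (a b : Int × Int) : Bool :=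
  decide (a.1 < b.1) || (!decide (b.1 < a.1) && decide (a.2 < b.2))

lemma pltb_iff (a b : Int × Int) : pltb a b = true ↔ pltp a b := by
  unfold pltb pltp; simp; omega

lemma min2?_append (xs : List (Int × Int)) (x : Int × Int) :
    PySem.List.min2? (xs ++ [x]) Prod.fst Prod.snd =
      match PySem.List.min2? xs Prod.fst Prod.snd with
      | none => some x
      | some m => if pltb x m then some x else some m := by
  cases hE : PySem.List.min2? xs Prod.fst Prod.snd with
  | none =>
    unfold PySem.List.min2? at hE ⊢
    rw [List.foldl_append, hE]
    rfl
  | some m =>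
    unfold PySem.List.min2? at hE ⊢
    rw [List.foldl_append, hE]
    simp only [List.foldl_cons, List.foldl_nil]
    by_cases h : pltp x m
    · rw [if_pos ((pltb_iff x m).mpr h)]
      have : (decide (x.1 < m.1) || (!decide (m.1 < x.1) && decide (x.2 < m.2))) = true := by
        unfold pltp at h; simp; omega
      simp [this]
    · rw [if_neg (fun hb => h ((pltb_iff x m).mp hb))]
      have : (decide (x.1 < m.1) || (!decide (m.1 < x.1) && decide (x.2 < m.2))) = false := by
        unfold pltp at h; simp; omega
      simp [this]

lemma min2?_spec (g : List (Int × Int)) (hg : g ≠ []) :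
    ∃ m', PySem.List.min2? g Prod.fst Prod.snd = some m' ∧ m' ∈ g ∧ ∀ y ∈ g, ¬ pltp y m' := by
  induction g using List.reverseRecOn with
  | nil => exact absurd rfl hg
  | append_singleton xs x ih =>
    rcases List.eq_nil_or_concat' xs with rfl | h
    · refine ⟨x, by rw [min2?_append]; rfl, by simp, ?_⟩
      simpa using pltp_irrefl x
    · have hxs : xs ≠ [] := by rcases h with ⟨ys, y, rfl⟩; simp
      obtain ⟨m', h1, h2, h3⟩ := ih hxs
      rw [min2?_append, h1]
      by_cases hx : pltp x m'
      · refine ⟨x, by simp [(pltb_iff x m').mpr hx], by simp, ?_⟩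
        intro y hy
        rcases List.mem_append.mp hy with hy' | hy'
        · intro hyx
          exact h3 y hy' (pltp_trans hyx hx)
        · simp at hy'; subst hy'; exact pltp_irrefl y
      · refine ⟨m', by simp [show ¬ pltb x m' = true from fun hb => hx ((pltb_iff x m').mp hb)], by simp [h2], ?_⟩
        intro y hy
        rcases List.mem_append.mp hy with hy' | hy'
        · exact h3 y hy'
        · simp at hy'; subst hy'; exact hx

lemma pyMinPair_spec {g : List (Int × Int)} (hg : g ≠ []) :
    pyMinPair g ∈ g ∧ ∀ y ∈ g, ¬ pltp y (pyMinPair g) := by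
  obtain ⟨m', h1, h2, h3⟩ := min2?_spec g hg
  rw [pyMinPair, h1]
  exact ⟨h2, h3⟩

lemma bfr_iff (a b : List (Int × Int)) :
    (decide ((pyMinPair a).1 < (pyMinPair b).1) ||
      (!decide ((pyMinPair b).1 < (pyMinPair a).1) && decide ((pyMinPair a).2 < (pyMinPair b).2))) = true
      ↔ pltp (pyMinPair a) (pyMinPair b) := by
  unfold pltp; simp; omega

lemma insertBy_pairwise_min (x : List (Int × Int)) (ys : List (List (Int × Int)))
    (h : ys.Pairwise (fun a b => ¬ pltp (pyMinPair b) (pyMinPair a))) :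
    (PySem.List.insertBy (fun a b => decide ((pyMinPair a).1 < (pyMinPair b).1) ||
        (!decide ((pyMinPair b).1 < (pyMinPair a).1) && decide ((pyMinPair a).2 < (pyMinPair b).2)))
      x ys).Pairwise (fun a b => ¬ pltp (pyMinPair b) (pyMinPair a)) := by
  induction ys with
  | nil => simp [PySem.List.insertBy]
  | cons y ys ih =>
    rw [PySem.List.insertBy]
    by_cases hxy : pltp (pyMinPair x) (pyMinPair y)
    · rw [if_pos ((bfr_iff x y).mpr hxy)]
      rcases List.pairwise_cons.mp h with ⟨hy, hys⟩
      refine List.pairwise_cons.mpr ⟨?_, h⟩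
      intro z hz
      rcases List.mem_cons.mp hz with rfl | hz'
      · intro hc; exact absurd (pltp_trans hc hxy) (pltp_irrefl _)
      · intro hc
        exact hy z hz' (pltp_trans hc hxy)
    · rw [if_neg (by rw [bfr_iff]; exact hxy)]
      rcases List.pairwise_cons.mp h with ⟨hy, hys⟩
      refine List.pairwise_cons.mpr ⟨?_, ih hys⟩
      intro z hz
      rcases (PySem.List.mem_insertBy _ _ _ _).mp hz with rfl | hz'
      · exact hxy
      · exact hy z hz'

lemma sorted2_append_min (xs : List (List (Int × Int))) (x : List (Int × Int)) :
    PySem.List.sorted2 (xs ++ [x]) (fun p => (pyMinPair p).1) (fun p => (pyMinPair p).2) false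
      = PySem.List.insertBy (fun a b => decide ((pyMinPair a).1 < (pyMinPair b).1) ||
          (!decide ((pyMinPair b).1 < (pyMinPair a).1) && decide ((pyMinPair a).2 < (pyMinPair b).2)))
        x (PySem.List.sorted2 xs (fun p => (pyMinPair p).1) (fun p => (pyMinPair p).2) false) := by
  unfold PySem.List.sorted2
  simp only [List.foldl_append, List.foldl_cons, List.foldl_nil, if_neg (by decide : ¬ (false = true))]

lemma sorted2_pairwise_min (xs : List (List (Int × Int))) :
    (PySem.List.sorted2 xs (fun p => (pyMinPair p).1) (fun p => (pyMinPair p).2)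
      false).Pairwise (fun a b => ¬ pltp (pyMinPair b) (pyMinPair a)) := by
  induction xs using List.reverseRecOn with
  | nil => exact List.Pairwise.nil
  | append_singleton xs x ih =>
    rw [sorted2_append_min]
    exact insertBy_pairwise_min x _ ih

def cov : List (Int × Int) → List (List (Int × Int)) → Int
  | G, [] => if G = [] then 1 else 0
  | G, p :: L => (if PySem.Set.issubset p G then cov (PySem.Set.diff G p) L else 0) + cov G L

lemma cov_cons (G p : List (Int × Int)) (L : List (List (Int × Int))) :
    cov G (p :: L) = (if PySem.Set.issubset p G = true then cov (PySem.Set.diff G p) L else 0)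
      + cov G L := rfl

lemma subP_diff_iff {p r G : List (Int × Int)} :
    (∀ x ∈ p, x ∈ PySem.Set.diff G r) ↔ (∀ x ∈ p, x ∈ G) ∧ (∀ x ∈ p, x ∉ r) := by
  simp only [PySem.Set.mem_diff]
  exact ⟨fun h => ⟨fun x hx => (h x hx).1, fun x hx => (h x hx).2⟩,
         fun ⟨h1, h2⟩ x hx => ⟨h1 x hx, h2 x hx⟩⟩

lemma cov_nil_grid {L : List (List (Int × Int))} (h : ∀ p ∈ L, p ≠ []) : cov [] L = 1 := by
  induction L with
  | nil => simp [cov]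
  | cons p L ih =>
    have hp : PySem.Set.issubset p ([] : List (Int × Int)) ≠ true := by
      simp only [ne_eq, PySem.Set.issubset_iff]
      intro hsub
      obtain ⟨a, ha⟩ := List.exists_mem_of_ne_nil p (h p List.mem_cons_self)
      simpa using hsub a ha
    simp only [cov, if_neg hp, zero_add]
    exact ih (fun q hq => h q (List.mem_cons_of_mem _ hq))

lemma cov_eq_zero_of_uncovered {c : Int × Int} :
    ∀ (L : List (List (Int × Int))) (G : List (Int × Int)),
      c ∈ G → (∀ p ∈ L, c ∉ p) → cov G L = 0 := by
  intro L
  induction L with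
  | nil => intro G hc h; simp [cov]; rintro rfl; simp at hc
  | cons p L ih =>
    intro G hc h
    have h1 : cov (PySem.Set.diff G p) L = 0 := by
      apply ih _ ((PySem.Set.mem_diff G p c).mpr ⟨hc, h p List.mem_cons_self⟩)
      exact fun q hq => h q (List.mem_cons_of_mem _ hq)
    have h2 : cov G L = 0 := ih G hc (fun q hq => h q (List.mem_cons_of_mem _ hq))
    simp [cov, h1, h2]

lemma cov_filter_eq {q : List (Int × Int) → Bool} :
    ∀ (L : List (List (Int × Int))) (G : List (Int × Int)),
      (∀ p ∈ L, q p = false → ¬ (∀ x ∈ p, x ∈ G)) →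
      cov G (L.filter q) = cov G L := by
  intro L
  induction L with
  | nil => intro G _; rfl
  | cons p L ih =>
    intro G h
    by_cases hq : q p = true
    · rw [List.filter_cons_of_pos hq]
      simp only [cov]
      congr 1
      · by_cases hs : PySem.Set.issubset p G = true
        · rw [if_pos hs, if_pos hs]
          apply ih
          intro p' hp' hqp' hsub'
          exact h p' (List.mem_cons_of_mem _ hp') hqp'
            (fun x hx => ((PySem.Set.mem_diff G p x).mp (hsub' x hx)).1)
        · rw [if_neg hs, if_neg hs]
      · exact ih G (fun p' hp' => h p' (List.mem_cons_of_mem _ hp'))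
    · rw [List.filter_cons_of_neg (by simpa using hq)]
      rw [ih G (fun p' hp' => h p' (List.mem_cons_of_mem _ hp'))]
      have hns : PySem.Set.issubset p G ≠ true := by
        simp only [ne_eq, PySem.Set.issubset_iff]
        exact h p List.mem_cons_self (by simpa using hq)
      simp [cov, if_neg hns]

lemma diff_diff_comm (G x y : List (Int × Int)) :
    PySem.Set.diff (PySem.Set.diff G x) y = PySem.Set.diff (PySem.Set.diff G y) x := by
  simp only [PySem.Set.diff, List.filter_filter]
  exact List.filter_congr (fun a _ => by rw [Bool.and_comm])

lemma sub_of_sub_diff {p G r : List (Int × Int)} (h : ∀ a ∈ p, a ∈ PySem.Set.diff G r) :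
    ∀ a ∈ p, a ∈ G := fun a ha => ((PySem.Set.mem_diff G r a).mp (h a ha)).1

lemma cov_perm {L L' : List (List (Int × Int))} (h : L.Perm L') :
    ∀ G : List (Int × Int), cov G L = cov G L' := by
  induction h with
  | nil => intro G; rfl
  | cons p _ ih =>
    intro G
    simp only [cov, ih]
  | swap x y l =>
    intro G
    simp only [cov]
    by_cases h1 : PySem.Set.issubset y G = true <;>
      by_cases h2 : PySem.Set.issubset x G = true
    · -- both fit in G
      have hiff : PySem.Set.issubset x (PySem.Set.diff G y) = true
          ↔ PySem.Set.issubset y (PySem.Set.diff G x) = true := by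
        simp only [PySem.Set.issubset_iff, subP_diff_iff] at *
        constructor
        · rintro ⟨-, hd⟩
          exact ⟨h1, fun a ha hax => hd a hax ha⟩
        · rintro ⟨-, hd⟩
          exact ⟨h2, fun a ha hay => hd a hay ha⟩
      by_cases h3 : PySem.Set.issubset x (PySem.Set.diff G y) = true
      · simp only [h1, h2, h3, hiff.mp h3, if_true, diff_diff_comm G x y]
        ring
      · simp only [h1, h2, if_true, if_neg h3, if_neg (fun hc => h3 (hiff.mpr hc))]
        ring
    · -- y fits, x does not
      have h3 : ¬ PySem.Set.issubset x (PySem.Set.diff G y) = true := by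
        intro hc
        exact h2 ((PySem.Set.issubset_iff _ _).mpr
          (sub_of_sub_diff ((PySem.Set.issubset_iff _ _).mp hc)))
      simp only [h1, if_true, if_neg h2, if_neg h3]
      ring
    · -- x fits, y does not
      have h3 : ¬ PySem.Set.issubset y (PySem.Set.diff G x) = true := by
        intro hc
        exact h1 ((PySem.Set.issubset_iff _ _).mpr
          (sub_of_sub_diff ((PySem.Set.issubset_iff _ _).mp hc)))
      simp only [h2, if_true, if_neg h1, if_neg h3]
      ring
    · simp only [if_neg h1, if_neg h2]
  | trans _ _ ih1 ih2 =>
    intro G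
    rw [ih1, ih2]

lemma cov_pick {c : Int × Int} :
    ∀ (L : List (List (Int × Int))) (G : List (Int × Int)), c ∈ G →
      cov G L = (L.map (fun p =>
        if c ∈ p ∧ (∀ x ∈ p, x ∈ G) then cov (PySem.Set.diff G p) L else 0)).sum := by
  intro L
  induction L with
  | nil =>
    intro G hc
    have : G ≠ [] := by rintro rfl; simp at hc
    simp [cov, this]
  | cons hd tl ih =>
    intro G hc
    have hdrop : ∀ (p : List (Int × Int)), c ∈ p →
        cov (PySem.Set.diff G p) (hd :: tl) =
          (if PySem.Set.issubset hd (PySem.Set.diff G p) = true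
            then cov (PySem.Set.diff (PySem.Set.diff G p) hd) tl else 0)
          + cov (PySem.Set.diff G p) tl := by
    -- unfolding cov once
      intro p hp; rfl
    by_cases hc1 : c ∈ hd
    · -- every usable piece forbids hd afterwards: hd is not a subset of G - p when c ∈ p
      have hmap : (tl.map (fun p =>
          if c ∈ p ∧ (∀ x ∈ p, x ∈ G) then cov (PySem.Set.diff G p) (hd :: tl) else 0))
          = tl.map (fun p =>
          if c ∈ p ∧ (∀ x ∈ p, x ∈ G) then cov (PySem.Set.diff G p) tl else 0) := by
        apply List.map_congr_left
        intro p _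
        by_cases hcp : c ∈ p ∧ (∀ x ∈ p, x ∈ G)
        · rw [if_pos hcp, if_pos hcp, hdrop p hcp.1]
          have : PySem.Set.issubset hd (PySem.Set.diff G p) ≠ true := by
            simp only [ne_eq, PySem.Set.issubset_iff]
            intro hsub
            exact ((PySem.Set.mem_diff G p c).mp (hsub c hc1)).2 hcp.1
          rw [if_neg this, zero_add]
        · rw [if_neg hcp, if_neg hcp]
      rw [cov_cons, List.map_cons, List.sum_cons, hmap, ← ih G hc]
      congr 1
      by_cases hs : PySem.Set.issubset hd G = true
      · rw [if_pos hs, if_pos ⟨hc1, (PySem.Set.issubset_iff _ _).mp hs⟩, hdrop hd hc1]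
        have : PySem.Set.issubset hd (PySem.Set.diff G hd) ≠ true := by
          simp only [ne_eq, PySem.Set.issubset_iff]
          intro hsub
          exact ((PySem.Set.mem_diff G hd c).mp (hsub c hc1)).2 hc1
        rw [if_neg this, zero_add]
      · rw [if_neg hs, if_neg (fun hcc => hs ((PySem.Set.issubset_iff _ _).mpr hcc.2))]
    · -- c not in hd
      rw [cov_cons, List.map_cons, List.sum_cons,
        if_neg (show ¬(c ∈ hd ∧ ∀ x ∈ hd, x ∈ G) from fun hcc => hc1 hcc.1), zero_add]
      have hexp : (tl.map (fun p =>
          if c ∈ p ∧ (∀ x ∈ p, x ∈ G) then cov (PySem.Set.diff G p) (hd :: tl) else 0))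
          = tl.map (fun p =>
            (if c ∈ p ∧ (∀ x ∈ p, x ∈ G) then
                (if PySem.Set.issubset hd (PySem.Set.diff G p) = true
                  then cov (PySem.Set.diff (PySem.Set.diff G p) hd) tl else 0) else 0)
            + (if c ∈ p ∧ (∀ x ∈ p, x ∈ G) then cov (PySem.Set.diff G p) tl else 0)) := by
        apply List.map_congr_left
        intro p _
        by_cases hcp : c ∈ p ∧ (∀ x ∈ p, x ∈ G)
        · rw [if_pos hcp, if_pos hcp, if_pos hcp, hdrop p hcp.1]
        · rw [if_neg hcp, if_neg hcp, if_neg hcp, zero_add]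
      rw [hexp, PySem.List.sum_map_add_int, ← ih G hc]
      congr 1
      by_cases hs : PySem.Set.issubset hd G = true
      · rw [if_pos hs]
        have hcd : c ∈ PySem.Set.diff G hd := (PySem.Set.mem_diff G hd c).mpr ⟨hc, hc1⟩
        rw [ih (PySem.Set.diff G hd) hcd]
        apply congrArg List.sum
        apply List.map_congr_left
        intro p _
        have hiff : (c ∈ p ∧ (∀ x ∈ p, x ∈ G)) ∧ PySem.Set.issubset hd (PySem.Set.diff G p) = true
            ↔ c ∈ p ∧ (∀ x ∈ p, x ∈ PySem.Set.diff G hd) := by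
          simp only [PySem.Set.issubset_iff, subP_diff_iff]
          constructor
          · rintro ⟨⟨hcp, hpg⟩, -, hdp⟩
            exact ⟨hcp, hpg, fun a hap hahd => hdp a hahd hap⟩
          · rintro ⟨hcp, hpg, hpd⟩
            exact ⟨⟨hcp, hpg⟩, (PySem.Set.issubset_iff _ _).mp hs, fun a hahd hap => hpd a hap hahd⟩
        by_cases hcp : c ∈ p ∧ (∀ x ∈ p, x ∈ PySem.Set.diff G hd)
        · rw [if_pos hcp]
          have h2 := hiff.mpr hcp
          rw [if_pos h2.1, if_pos h2.2, diff_diff_comm]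
        · rw [if_neg hcp]
          by_cases ha : c ∈ p ∧ (∀ x ∈ p, x ∈ G)
          · rw [if_pos ha, if_neg (fun hb => hcp (hiff.mp ⟨ha, hb⟩))]
          · rw [if_neg ha]
      · rw [if_neg hs]
        have : (tl.map (fun p =>
            if c ∈ p ∧ (∀ x ∈ p, x ∈ G) then
              (if PySem.Set.issubset hd (PySem.Set.diff G p) = true
                then cov (PySem.Set.diff (PySem.Set.diff G p) hd) tl else 0) else 0))
            = tl.map (fun _ => (0 : Int)) := by
          apply List.map_congr_left
          intro p _
          by_cases hcp : c ∈ p ∧ (∀ x ∈ p, x ∈ G)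
          · rw [if_pos hcp]
            rw [if_neg]
            intro hb
            exact hs ((PySem.Set.issubset_iff _ _).mpr
              (sub_of_sub_diff ((PySem.Set.issubset_iff _ _).mp hb)))
          · rw [if_neg hcp]
        rw [this]
        simp

-- equation lemmas for the well-founded recursion of recurseA
lemma recurseA_empty (cands : List (List (Int × Int))) (depth : Int) :
    recurseA [] cands depth = 1 := by
  rw [recurseA.eq_def]; simp

lemma recurseA_nilcands {grid : List (Int × Int)} (depth : Int) (h : grid ≠ []) :
    recurseA grid [] depth = 0 := by
  rw [recurseA.eq_def]; simp [h]

lemma recurseA_cons {grid : List (Int × Int)} (hd : List (Int × Int))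
    (tl : List (List (Int × Int))) (depth : Int) (h : grid ≠ []) :
    recurseA grid (hd :: tl) depth =
      if pyMinPair grid ≠ pyMinPair hd then 0
      else if PySem.Set.issubset hd grid then
        recurseA (PySem.Set.diff grid hd) (tl.filter (fun t => PySem.Set.isdisjoint hd t)) (depth + 1)
          + recurseA grid tl (depth + 1)
      else recurseA grid tl (depth + 1) := by
  rw [recurseA.eq_def, if_neg h]

lemma recurse_eq_cov (N : Nat) :
    ∀ (cands : List (List (Int × Int))), cands.length ≤ N →
    ∀ (grid : List (Int × Int)) (depth : Int),
      (∀ p ∈ cands, p ≠ [] ∧ pyMinPair p ∈ grid) →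
      cands.Pairwise (fun a b => ¬ pltp (pyMinPair b) (pyMinPair a)) →
      recurseA grid cands depth = cov grid cands := by
  induction N with
  | zero =>
    intro cands hlen grid depth hinv _
    rw [List.length_eq_zero_iff.mp (Nat.le_zero.mp hlen)]
    by_cases hg : grid = []
    · subst hg; rw [recurseA_empty]; rfl
    · rw [recurseA_nilcands depth hg]
      simp [cov, hg]
  | succ N ih =>
    intro cands hlen grid depth hinv hsorted
    by_cases hg : grid = []
    · subst hg
      rw [recurseA_empty]
      rw [cov_nil_grid (fun p hp => (hinv p hp).1)]
    · match cands, hlen, hinv, hsorted with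
      | [], hlen, hinv, hsorted =>
        rw [recurseA_nilcands depth hg]
        simp [cov, hg]
      | hd :: tl, hlen, hinv, hsorted =>
        rw [recurseA_cons hd tl depth hg]
        have hmin := pyMinPair_spec hg
        rcases List.pairwise_cons.mp hsorted with ⟨hhd, htl⟩
        by_cases hne : pyMinPair grid ≠ pyMinPair hd
        · rw [if_pos hne]
          symm
          apply cov_eq_zero_of_uncovered (c := pyMinPair grid) _ _ hmin.1
          intro p hp hcp
          have hpne : p ≠ [] := (hinv p hp).1
          have hpmem : pyMinPair p ∈ grid := (hinv p hp).2
          have hps := pyMinPair_spec hpne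
          have e1 : pyMinPair p = pyMinPair grid :=
            pltp_total (hmin.2 _ hpmem) (hps.2 _ hcp)
          rcases List.mem_cons.mp hp with rfl | hp2
          · exact hne e1.symm
          · have e2 : pyMinPair hd = pyMinPair grid := by
              apply pltp_total (hmin.2 _ (hinv hd List.mem_cons_self).2)
              rw [← e1]; exact hhd p hp2
            exact hne e2.symm
        · rw [if_neg hne]
          have hlen2 : tl.length ≤ N := by simpa using hlen
          by_cases hsub : PySem.Set.issubset hd grid = true
          · rw [if_pos hsub]
            have hfil : (tl.filter (fun t => PySem.Set.isdisjoint hd t)).length ≤ N :=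
              le_trans (List.length_filter_le _ _) hlen2
            have hinvf : ∀ p ∈ tl.filter (fun t => PySem.Set.isdisjoint hd t),
                p ≠ [] ∧ pyMinPair p ∈ PySem.Set.diff grid hd := by
              intro p hp
              rcases List.mem_filter.mp hp with ⟨hp2, hdis⟩
              refine ⟨(hinv p (List.mem_cons_of_mem _ hp2)).1, ?_⟩
              rw [PySem.Set.mem_diff]
              refine ⟨(hinv p (List.mem_cons_of_mem _ hp2)).2, ?_⟩
              intro hmem
              exact ((PySem.Set.isdisjoint_iff hd p).mp hdis) _ hmem
                ((pyMinPair_spec (hinv p (List.mem_cons_of_mem _ hp2)).1).1)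
            have hsf : (tl.filter (fun t => PySem.Set.isdisjoint hd t)).Pairwise
                (fun a b => ¬ pltp (pyMinPair b) (pyMinPair a)) :=
              htl.sublist List.filter_sublist
            rw [ih _ hfil _ (depth + 1) hinvf hsf]
            rw [ih _ hlen2 _ (depth + 1)
              (fun p hp => hinv p (List.mem_cons_of_mem _ hp)) htl]
            rw [cov_filter_eq tl (PySem.Set.diff grid hd) ?hfe, cov_cons, if_pos hsub]
            case hfe =>
              intro p hp hq hsubp
              have hq2 : ¬ ∀ x ∈ hd, x ∉ p := by
                have hne2 : ¬ (PySem.Set.isdisjoint hd p = true) := by simp [hq]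
                exact fun hall => hne2 ((PySem.Set.isdisjoint_iff hd p).mpr hall)
              push Not at hq2
              obtain ⟨a, ha1, ha2⟩ := hq2
              exact ((PySem.Set.mem_diff grid hd a).mp (hsubp a ha2)).2 ha1
          · rw [if_neg hsub]
            rw [ih _ hlen2 _ (depth + 1)
              (fun p hp => hinv p (List.mem_cons_of_mem _ hp)) htl]
            rw [cov_cons, if_neg hsub, zero_add]

lemma sum_filter_map_if (q : List (Int × Int) → Bool) (g : List (Int × Int) → Int)
    (L : List (List (Int × Int))) :
    ((L.filter q).map g).sum = (L.map (fun p => if q p = true then g p else 0)).sum := by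
  induction L with
  | nil => rfl
  | cons p L ih =>
    by_cases hq : q p = true
    · rw [List.filter_cons_of_pos hq, List.map_cons, List.sum_cons,
        List.map_cons, List.sum_cons, if_pos hq, ih]
    · rw [List.filter_cons_of_neg (by simpa using hq), List.map_cons, List.sum_cons,
        if_neg hq, zero_add, ih]

lemma countB_eq_cov {pieces : List (List (Int × Int))} :
    ∀ (fuel : Nat) (grid : List (Int × Int)), grid.length < fuel →
      (∀ p ∈ pieces, p ≠ []) →
      countB pieces fuel grid = cov grid pieces := by
  intro fuel
  induction fuel with
  | zero => intro grid h _; omega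
  | succ fuel ih =>
    intro grid hlen hne
    by_cases hg : grid = []
    · subst hg
      rw [show countB pieces (fuel + 1) [] = 1 from rfl]
      rw [cov_nil_grid hne]
    · have hmin := pyMinPair_spec hg
      have e1 : countB pieces (fuel + 1) grid =
          ((pieces.filter (fun p => PySem.Set.contains p (pyMinPair grid)
              && PySem.Set.issubset p grid)).map
            (fun p => countB pieces fuel (PySem.Set.diff grid p))).sum := by
        rw [countB, if_neg hg]
      rw [e1, sum_filter_map_if, cov_pick pieces grid hmin.1]
      apply congrArg List.sum
      apply List.map_congr_left
      intro p hp
      by_cases hc : (PySem.Set.contains p (pyMinPair grid) && PySem.Set.issubset p grid) = true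
      · rcases Bool.and_eq_true_iff.mp hc with ⟨hc1, hc2⟩
        have hcmem : pyMinPair grid ∈ p := (PySem.Set.contains_iff p _).mp hc1
        rw [if_pos hc, if_pos ⟨hcmem, (PySem.Set.issubset_iff p _).mp hc2⟩]
        apply ih _ _ hne
        have hdlt : (PySem.Set.diff grid p).length < grid.length := by
          show (grid.filter _).length < grid.length
          rw [List.length_filter_lt_length_iff_exists]
          refine ⟨pyMinPair grid, hmin.1, ?_⟩
          simp [hcmem]
        omega
      · rw [if_neg hc, if_neg]
        intro hcc
        apply hc
        rw [Bool.and_eq_true_iff]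
        exact ⟨(PySem.Set.contains_iff p _).mpr hcc.1, (PySem.Set.issubset_iff p _).mpr hcc.2⟩

lemma triRegion_zero_mem {a : Int} (ha : 1 ≤ a) : ((0 : Int), (0 : Int)) ∈ triRegion a := by
  rw [triRegion, PySem.Set.mem_ofList, List.mem_flatMap]
  refine ⟨0, PySem.List.mem_pyRange_one.mpr ⟨le_refl 0, by omega⟩, ?_⟩
  rw [List.mem_filterMap]
  exact ⟨0, PySem.List.mem_pyRange_one.mpr ⟨le_refl 0, by omega⟩, by simp⟩

lemma rawPieces_ne_nil {n : Int} {p : List (Int × Int)} (hp : p ∈ rawPieces n) : p ≠ [] := by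
  rw [rawPieces, PySem.List.foldl_append_eq_flatMap, List.nil_append, List.mem_flatMap] at hp
  obtain ⟨size, hsize, hp2⟩ := hp
  rw [List.mem_flatMap] at hp2
  obtain ⟨ox, _, hp3⟩ := hp2
  rw [List.mem_map] at hp3
  obtain ⟨oy, _, rfl⟩ := hp3
  intro hnil
  have h1 : 1 ≤ size := (PySem.List.mem_pyRange_one.mp hsize).1
  have : ((0 : Int) + ox, (0 : Int) + oy) ∈ shift (triRegion size) ox oy := by
    rw [shift, PySem.Set.mem_ofList, List.mem_map]
    exact ⟨((0 : Int), (0 : Int)), triRegion_zero_mem h1, rfl⟩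
  rw [hnil] at this
  simp at this

lemma fitPieces_mem {n : Int} {p : List (Int × Int)} (hp : p ∈ fitPieces n) :
    p ≠ [] ∧ pyMinPair p ∈ triRegion n := by
  rcases List.mem_filter.mp hp with ⟨hraw, hsub⟩
  have hne := rawPieces_ne_nil hraw
  refine ⟨hne, ?_⟩
  exact ((PySem.Set.issubset_iff p _).mp hsub) _ (pyMinPair_spec hne).1

-- ===== VERDICT (by name: the statement is the Claim_ definition above) =====
theorem f_spec : Claim_equal_f := by
  intro n _
  show f n = f_alt n
  rw [f, f_alt]
  have hperm : (PySem.List.sorted2 (fitPieces n)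
      (fun p => (pyMinPair p).1) (fun p => (pyMinPair p).2) false).Perm (fitPieces n) :=
    PySem.List.sorted2_perm _ _ _ _
  have hinv : ∀ p ∈ PySem.List.sorted2 (fitPieces n)
      (fun p => (pyMinPair p).1) (fun p => (pyMinPair p).2) false,
      p ≠ [] ∧ pyMinPair p ∈ triRegion n :=
    fun p hp => fitPieces_mem (hperm.mem_iff.mp hp)
  rw [recurse_eq_cov _ _ (le_refl _) _ 1 hinv (sorted2_pairwise_min _)]
  rw [cov_perm hperm]
  rw [countB_eq_cov _ _ (by omega) (fun p hp => (fitPieces_mem hp).1)]
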